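-- pv_equiv track=rewrite | github.com/prettygood236/coding-challenges | __hash__.py | solution
-- ===== SOURCE A (Python) =====
-- from itertools import combinations
-- from math import prod
--
-- def solution(clothes):
--     dic = {}
--     for value,key in clothes:
--         dic[key] = []
--     for value,key in clothes:
--         dic[key].append(value)
--     lis = []
--     for value in dic.values():
--         lis.append(len(value))
--
--     answer = sum(lis)
--     # breakpoint()
--     for i in range(2,len(lis)+1):
--         l = list(combinations(lis,i))
--         for x in l:
--             answer += prod(x)
--     # breakpoint()
--     return answer
-- ===== SOURCE B (Python) =====
-- def solution(clothes):
--     counts = {}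
--     for _, key in clothes:
--         counts[key] = counts.get(key, 0) + 1
--     answer = 1
--     for c in counts.values():
--         answer *= c + 1
--     return answer - 1
-- ===== Notes on version B (the rewrite author's own statement) =====
-- stated objective: faster
-- what changed: Replaces the exponential enumeration of all size>=2 combinations of category counts by the closed form prod(count_i + 1) - 1, computed with a single counting pass over the input.
import Mathlib
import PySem

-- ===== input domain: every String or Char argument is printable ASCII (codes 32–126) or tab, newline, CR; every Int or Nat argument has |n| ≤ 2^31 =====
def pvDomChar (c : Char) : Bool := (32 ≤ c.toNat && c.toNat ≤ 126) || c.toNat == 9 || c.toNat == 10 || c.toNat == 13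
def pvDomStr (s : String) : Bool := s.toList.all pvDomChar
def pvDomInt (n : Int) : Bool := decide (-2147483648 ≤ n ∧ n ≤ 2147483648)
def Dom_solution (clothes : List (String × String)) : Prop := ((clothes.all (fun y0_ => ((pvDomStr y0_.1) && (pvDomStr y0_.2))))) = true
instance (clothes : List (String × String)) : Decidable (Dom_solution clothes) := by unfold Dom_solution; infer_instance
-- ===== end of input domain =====

-- B replaces A's enumeration of all size-≥2 combinations by the closed form ∏(count_i+1) − 1 over one counting pass.

-- ===== PORT A =====
-- itertools.combinations over a list of ints, in itertools' order
def pyCombinations : Nat → List Int → List (List Int)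
  | 0, _ => [[]]
  | _ + 1, [] => []
  | k + 1, x :: xs => (pyCombinations k xs).map (x :: ·) ++ pyCombinations (k + 1) xs

def solution (clothes : List (String × String)) : Int :=
  let dic1 := clothes.foldl (fun d p => d.insert p.2 ([] : List String)) PySem.Dict.empty
  let dic := clothes.foldl (fun d p => d.modify p.2 [] (fun v => v ++ [p.1])) dic1
  let lis : List Int := dic.values.foldl (fun l v => l ++ [(v.length : Int)]) []
  let answer := lis.sum
  (PySem.List.pyRange 2 ((lis.length : Int) + 1) 1).foldl
    (fun a i => (pyCombinations i.toNat lis).foldl (fun a x => a + x.prod) a) answer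

-- ===== PORT B =====
def solution_alt (clothes : List (String × String)) : Int :=
  let counts := clothes.foldl (fun d p => d.insert p.2 (d.getD p.2 0 + 1)) PySem.Dict.empty
  let answer := counts.values.foldl (fun a c => a * (c + 1)) 1
  answer - 1

-- ===== PRECONDITION & SPEC =====
def Spec_solution (clothes : List (String × String)) (out : Int) : Prop := out = solution_alt clothes
instance (clothes : List (String × String)) (out : Int) : Decidable (Spec_solution clothes out) := by unfold Spec_solution; infer_instance

-- ===== CLAIM (what is proved, stated in full; the proofs are below) =====
def Claim_equal_solution : Prop := ∀ (clothes : List (String × String)), Dom_solution clothes → Spec_solution clothes (solution clothes)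

-- ===== LEMMAS AND PROOFS =====

-- sum of products over all k-combinations
def combSum (k : Nat) (xs : List Int) : Int := ((pyCombinations k xs).map List.prod).sum

theorem combSum_zero (xs : List Int) : combSum 0 xs = 1 := by
  simp [combSum, pyCombinations]

theorem combSum_succ_cons (k : Nat) (x : Int) (xs : List Int) :
    combSum (k + 1) (x :: xs) = x * combSum k xs + combSum (k + 1) xs := by
  simp [combSum, pyCombinations, List.map_map, Function.comp_def, List.sum_map_mul_left]

theorem pyCombinations_eq_nil (xs : List Int) (k : Nat) (h : xs.length < k) :
    pyCombinations k xs = [] := by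
  induction xs generalizing k with
  | nil =>
    cases k with
    | zero => omega
    | succ k => rfl
  | cons x xs ih =>
    cases k with
    | zero => omega
    | succ k =>
      have h1 : xs.length < k := by simp at h; omega
      simp only [pyCombinations]
      rw [ih k h1, ih (k + 1) (by omega)]
      rfl

theorem combSum_of_gt (xs : List Int) (k : Nat) (h : xs.length < k) : combSum k xs = 0 := by
  simp [combSum, pyCombinations_eq_nil xs k h]

theorem combSum_one (xs : List Int) : combSum 1 xs = xs.sum := by
  induction xs with
  | nil => rfl
  | cons x xs ih =>
    rw [combSum_succ_cons, combSum_zero, ih]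
    simp

-- total over all sizes is the product of (x+1)
theorem combSum_total (xs : List Int) :
    ∑ k ∈ Finset.range (xs.length + 1), combSum k xs = (xs.map (· + 1)).prod := by
  induction xs with
  | nil => simp [combSum_zero]
  | cons x xs ih =>
    have h0 : ∑ i ∈ Finset.range (xs.length + 1 + 1), combSum i (x :: xs)
        = (∑ i ∈ Finset.range (xs.length + 1), combSum (i + 1) (x :: xs)) + combSum 0 (x :: xs) :=
      Finset.sum_range_succ' _ _
    have h1 : ∀ i ∈ Finset.range (xs.length + 1),
        combSum (i + 1) (x :: xs) = x * combSum i xs + combSum (i + 1) xs :=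
      fun i _ => combSum_succ_cons i x xs
    have h2 : ∑ i ∈ Finset.range (xs.length + 1), combSum (i + 1) xs
        = ∑ i ∈ Finset.range xs.length, combSum (i + 1) xs + combSum (xs.length + 1) xs :=
      Finset.sum_range_succ _ _
    have h3 : ∑ i ∈ Finset.range (xs.length + 1), combSum i xs
        = ∑ i ∈ Finset.range xs.length, combSum (i + 1) xs + combSum 0 xs :=
      Finset.sum_range_succ' _ _
    have h4 : ∑ i ∈ Finset.range xs.length, combSum (i + 1) xs = (xs.map (· + 1)).prod - 1 := by
      rw [← ih, h3, combSum_zero]; ring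
    simp only [List.length_cons, List.map_cons, List.prod_cons]
    rw [h0, Finset.sum_congr rfl h1, Finset.sum_add_distrib, ← Finset.mul_sum, h2,
      combSum_of_gt xs _ (by omega), h4, combSum_zero, ih]
    ring

theorem sum_map_range (m : Nat) (f : Nat → Int) :
    ((List.range m).map f).sum = ∑ i ∈ Finset.range m, f i := by
  induction m with
  | zero => simp
  | succ m ih => simp [List.range_succ, Finset.sum_range_succ, ih]

-- the closed-form value of A's combination loop
theorem closed_form (L : List Int) :
    L.sum + ((PySem.List.pyRange 2 ((L.length : Int) + 1) 1).map (fun i => combSum i.toNat L)).sum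
      = (L.map (· + 1)).prod - 1 := by
  rw [PySem.List.pyRange_one]
  have hto : (((L.length : Int) + 1) - 2).toNat = L.length - 1 := by omega
  rw [hto, List.map_map]
  have hcg : ∀ k ∈ List.range (L.length - 1),
      ((fun i => combSum i.toNat L) ∘ (fun k : Nat => (2 : Int) + (k : Int))) k = combSum (k + 2) L := by
    intro k _
    have : ((2 : Int) + (k : Int)).toNat = k + 2 := by omega
    simp [Function.comp, this]
  rw [List.map_congr_left hcg, sum_map_range]
  cases L with
  | nil => simp
  | cons x xs =>
    have hn : (x :: xs).length - 1 = xs.length := by simp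
    rw [hn]
    have e0 := combSum_total (x :: xs)
    have e1 : ∑ i ∈ Finset.range (xs.length + 1 + 1), combSum i (x :: xs)
        = (∑ i ∈ Finset.range (xs.length + 1), combSum (i + 1) (x :: xs)) + combSum 0 (x :: xs) :=
      Finset.sum_range_succ' _ _
    have e2 : ∑ i ∈ Finset.range (xs.length + 1), combSum (i + 1) (x :: xs)
        = (∑ i ∈ Finset.range xs.length, combSum (i + 1 + 1) (x :: xs)) + combSum 1 (x :: xs) :=
      Finset.sum_range_succ' _ _
    simp only [List.length_cons] at e0
    rw [e1, e2, combSum_zero, combSum_one] at e0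
    have : ∑ i ∈ Finset.range xs.length, combSum (i + 1 + 1) (x :: xs)
        = ∑ i ∈ Finset.range xs.length, combSum (i + 2) (x :: xs) := by
      exact Finset.sum_congr rfl (fun i _ => by norm_num)
    rw [this] at e0
    omega

-- ==== Dict lemmas ====

theorem dict_insert_values_const {κ : Type} [BEq κ] (d : PySem.Dict κ (List String)) (k : κ)
    (h : ∀ kv ∈ d.items, kv.2 = ([] : List String)) :
    ∀ kv ∈ (d.insert k ([] : List String)).items, kv.2 = ([] : List String) := by
  intro kv hkv
  simp only [PySem.Dict.insert] at hkv
  split at hkv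
  · simp only [List.mem_map] at hkv
    obtain ⟨p, hp, hpe⟩ := hkv
    split at hpe
    · simp [← hpe]
    · exact hpe ▸ h p hp
  · rcases List.mem_append.1 hkv with h1 | h1
    · exact h kv h1
    · simp at h1; simp [h1]

theorem fold_insert_const_values (l : List (String × String)) (d : PySem.Dict String (List String))
    (h : ∀ kv ∈ d.items, kv.2 = ([] : List String)) :
    ∀ kv ∈ (l.foldl (fun d p => d.insert p.2 ([] : List String)) d).items, kv.2 = ([] : List String) := by
  induction l generalizing d with
  | nil => exact h
  | cons p l ih => exact ih _ (dict_insert_values_const d p.2 h)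

theorem dict_getD_of_const (d : PySem.Dict String (List String)) (k : String)
    (h : ∀ kv ∈ d.items, kv.2 = ([] : List String)) :
    d.getD k ([] : List String) = [] := by
  simp only [PySem.Dict.getD, PySem.Dict.get?]
  cases hf : d.items.find? (fun p => p.1 == k) with
  | none => rfl
  | some p => simp [h p (List.mem_of_find?_eq_some hf)]

theorem dict_values_eq_map_getD {ν : Type} (l : List (String × ν)) (dflt : ν)
    (h : (l.map Prod.fst).Nodup) :
    (PySem.Dict.mk l).values = (l.map Prod.fst).map (fun k => (PySem.Dict.mk l).getD k dflt) := by
  induction l with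
  | nil => rfl
  | cons kv rest ih =>
    simp only [List.map_cons, List.nodup_cons] at h ⊢
    obtain ⟨hk0, hrest⟩ := h
    have hhead : (PySem.Dict.mk (kv :: rest)).getD kv.1 dflt = kv.2 := by
      simp [PySem.Dict.getD, PySem.Dict.get?, List.find?]
    have htail : ∀ k ∈ rest.map Prod.fst,
        (PySem.Dict.mk (kv :: rest)).getD k dflt = (PySem.Dict.mk rest).getD k dflt := by
      intro k hkmem
      have hne : ¬ (kv.1 == k) = true := by
        simp only [beq_iff_eq]
        intro he; exact hk0 (he ▸ hkmem)
      simp [PySem.Dict.getD, PySem.Dict.get?, List.find?, hne]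
    have : (PySem.Dict.mk rest).values
        = (rest.map Prod.fst).map (fun k => (PySem.Dict.mk rest).getD k dflt) := ih hrest
    calc (PySem.Dict.mk (kv :: rest)).values
        = kv.2 :: (PySem.Dict.mk rest).values := rfl
      _ = kv.2 :: (rest.map Prod.fst).map (fun k => (PySem.Dict.mk rest).getD k dflt) := by rw [this]
      _ = (PySem.Dict.mk (kv :: rest)).getD kv.1 dflt
            :: (rest.map Prod.fst).map (fun k => (PySem.Dict.mk (kv :: rest)).getD k dflt) := by
          rw [hhead, List.map_congr_left (fun k hk => (htail k hk).symm)]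

theorem set_add_of_mem {α : Type} [BEq α] [LawfulBEq α] (s : PySem.Set α) (x : α) (hx : x ∈ s) :
    PySem.Set.add s x = s := by
  simp [PySem.Set.add, PySem.Set.contains, hx]

theorem set_update_of_subset {α : Type} [BEq α] [LawfulBEq α] (xs : List α) (s : PySem.Set α)
    (h : ∀ x ∈ xs, x ∈ s) : PySem.Set.update s xs = s := by
  induction xs generalizing s with
  | nil => rfl
  | cons x xs ih =>
    have hx : x ∈ s := h x (by simp)
    show PySem.Set.update (PySem.Set.add s x) xs = s
    rw [set_add_of_mem s x hx]
    exact ih s (fun y hy => h y (by simp [hy]))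

theorem foldl_mul_succ (l : List Int) (a : Int) :
    l.foldl (fun a c => a * (c + 1)) a = a * (l.map (· + 1)).prod := by
  induction l generalizing a with
  | nil => simp
  | cons c l ih => simp [ih, mul_assoc]

theorem count_filter_snd (clothes : List (String × String)) (k : String) :
    (clothes.filter (fun p => p.2 == k)).length = (clothes.map Prod.snd).count k := by
  rw [List.count_eq_countP, List.countP_map, ← List.countP_eq_length_filter]
  rfl

-- ===== VERDICT (by name: the statement is the Claim_ definition above) =====
theorem solution_spec : Claim_equal_solution := by
  intro clothes _
  unfold Spec_solution solution solution_alt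
  simp only []
  set ks := clothes.map Prod.snd with hks
  -- B side
  have hBfold : clothes.foldl (fun d p => d.insert p.2 (d.getD p.2 0 + 1)) PySem.Dict.empty
      = PySem.Dict.counter ks := by
    rw [← PySem.Dict.foldl_insert_getD_add_one_eq_counter ks, hks, List.foldl_map]
  have hBvals : (PySem.Dict.counter ks).values
      = (PySem.Set.ofList ks).map (fun k => ((ks.count k : Int))) := by
    simp [PySem.Dict.values, PySem.Dict.items_counter, List.map_map, Function.comp_def]
  -- A side
  set d1 := clothes.foldl (fun d p => d.insert p.2 ([] : List String)) PySem.Dict.empty with hd1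
  set dic := clothes.foldl (fun d p => d.modify p.2 [] (fun v => v ++ [p.1])) d1 with hdic
  have hconst : ∀ kv ∈ d1.items, kv.2 = ([] : List String) :=
    fold_insert_const_values clothes PySem.Dict.empty (by intro kv h; simp [PySem.Dict.empty] at h)
  have hk1 : d1.keys = PySem.Set.ofList ks := by
    rw [hd1, PySem.Dict.keys_foldl_insert_key clothes Prod.snd (fun _ _ => ([] : List String))]
    rfl
  have hkeys : dic.keys = PySem.Set.ofList ks := by
    rw [hdic, PySem.Dict.keys_foldl_modify_key clothes Prod.snd ([] : List String)
      (fun _ p v => v ++ [p.1]), hk1]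
    exact set_update_of_subset ks _ (fun x hx => (PySem.Set.mem_ofList ks x).2 hx)
  have hgd : ∀ k, dic.getD k ([] : List String)
      = (clothes.filter (fun p => p.2 == k)).map Prod.fst := by
    intro k
    have hfold : clothes.foldl (fun d p => d.modify p.2 [] (fun v => v ++ [p.1])) d1
        = (clothes.map (fun p => (p.2, p.1))).foldl
            (fun d p => d.modify p.1 [] (fun v => v ++ [p.2])) d1 := by
      rw [List.foldl_map]
    rw [hdic, hfold, PySem.Dict.getD_foldl_modify_append, dict_getD_of_const d1 k hconst]
    rw [List.filter_map, List.map_map]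
    rfl
  have hvals : dic.values = (PySem.Set.ofList ks).map (fun k => dic.getD k ([] : List String)) := by
    have hnd : (dic.items.map Prod.fst).Nodup := by
      have : dic.keys.Nodup := hkeys ▸ PySem.Set.nodup_ofList ks
      simpa [PySem.Dict.keys] using this
    have := dict_values_eq_map_getD dic.items ([] : List String) hnd
    simpa [PySem.Dict.keys] using (hkeys ▸ this)
  -- the counts list is the same on both sides
  have hlis : dic.values.foldl (fun l v => l ++ [(v.length : Int)]) []
      = (PySem.Set.ofList ks).map (fun k => ((ks.count k : Int))) := by
    rw [PySem.List.foldl_append_singleton_eq_map, hvals, List.map_map]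
    simp only [List.nil_append, Function.comp_def]
    refine List.map_congr_left (fun k _ => ?_)
    rw [hgd k, List.length_map, count_filter_snd]
  set L := (PySem.Set.ofList ks).map (fun k => ((ks.count k : Int))) with hL
  rw [hlis, hBfold, hBvals, foldl_mul_succ]
  simp only [PySem.List.foldl_add]
  have := closed_form L
  simp only [combSum] at this
  rw [this]
  ring
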